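-- pv_equiv track=rewrite | github.com/vermayash401/Project-at-URSC | Code/PipelineV3/rice_encoding_adaptive_k.py | estimate_k_window_optimal
-- ===== SOURCE A (Python) =====
-- def estimate_k_window_optimal(window_payloads,k_max=7):
--
--     #best k found
--     best_k=0
--
--     #lowest cost found
--     best_cost=float("inf")
--
--     #try all k values
--     for k in range(k_max+1):
--
--         #reset cost
--         cost=0
--
--         #iterate payloads
--         for payload in window_payloads:
--
--             #iterate symbols
--             for s in payload:
--
--                 #compute quotient
--                 q=s>>k
--
--                 #add rice cost
--                 cost+=q+1+k
--
--         #update best k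
--         if cost<best_cost:
--
--             #store best cost
--             best_cost=cost
--
--             #store best k
--             best_k=k
--
--     return best_k
-- ===== SOURCE B (Python) =====
-- def estimate_k_window_optimal(window_payloads, k_max=7):
--     # One pass over the symbols: accumulate sum(s >> k) per k and the symbol
--     # count n, then score each k as costs[k] + n*(1+k) and take the first minimum.
--     m = k_max + 1
--     costs = [0] * m
--     n = 0
--     for payload in window_payloads:
--         for s in payload:
--             n += 1
--             for k in range(m):
--                 costs[k] += s >> k
--     best_k = 0
--     best = None
--     for k in range(m):
--         total = costs[k] + n * (1 + k)
--         if best is None or total < best: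
--             best = total
--             best_k = k
--     return best_k
-- ===== Notes on version B (the rewrite author's own statement) =====
-- stated objective: alternative
-- what changed: Replaces A's per-k rescans of all symbols by a single pass that accumulates a per-k cost table plus a symbol counter, then scores each k as costs[k] + n*(1+k) and picks the first minimum.
import Mathlib
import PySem

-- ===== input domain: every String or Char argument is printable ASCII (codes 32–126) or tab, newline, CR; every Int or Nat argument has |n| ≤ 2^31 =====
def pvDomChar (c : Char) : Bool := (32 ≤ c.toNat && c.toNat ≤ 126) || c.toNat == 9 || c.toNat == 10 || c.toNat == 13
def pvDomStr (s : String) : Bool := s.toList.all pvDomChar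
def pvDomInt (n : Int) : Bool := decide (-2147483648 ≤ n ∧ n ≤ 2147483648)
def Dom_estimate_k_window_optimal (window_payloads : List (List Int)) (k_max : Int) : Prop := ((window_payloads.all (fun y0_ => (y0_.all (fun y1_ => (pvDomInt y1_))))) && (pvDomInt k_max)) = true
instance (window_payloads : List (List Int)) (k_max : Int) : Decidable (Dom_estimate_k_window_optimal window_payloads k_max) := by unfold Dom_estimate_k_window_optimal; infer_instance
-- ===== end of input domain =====

-- B makes one pass over the symbols building a per-k cost table instead of rescanning all data for each k; same value, proved equal.

-- ===== PORT A =====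
-- best_cost = float("inf") is modelled as Option Int (none = +inf); 'cost < best_cost' is true when best_cost is none.
-- s >> k is Lean's 's >>> k.toNat' (exact: k ranges over range(k_max+1), so k ≥ 0).
def estimate_k_window_optimal (window_payloads : List (List Int)) (k_max : Int) : Int :=
  ((PySem.List.pyRange 0 (k_max + 1) 1).foldl
    (fun (st : Int × Option Int) k =>
      let cost := window_payloads.foldl
        (fun cost payload =>
          payload.foldl (fun cost (s : Int) => cost + ((s >>> k.toNat) + 1 + k)) cost) 0
      match st.2 with
      | none => (k, some cost)
      | some bc => if cost < bc then (k, some cost) else st)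
    (0, none)).1

-- ===== PORT B =====
-- B-side helper: the single data pass; state = (costs table of length m, symbol count n).
-- The Python inner 'for k in range(m): costs[k] += s >> k' is the index-wise update mapIdx over the table.
def pvAltPass (window_payloads : List (List Int)) (m : Nat) : List Int × Int :=
  window_payloads.foldl
    (fun st payload =>
      payload.foldl
        (fun (st : List Int × Int) (s : Int) =>
          (st.1.mapIdx (fun k (c : Int) => c + (s >>> k)), st.2 + 1)) st)
    (List.replicate m (0 : Int), (0 : Int))

-- best = None is Option Int; the scoring loop over range(m) takes the first strict minimum.
def estimate_k_window_optimal_alt (window_payloads : List (List Int)) (k_max : Int) : Int :=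
  ((List.range (k_max + 1).toNat).foldl
    (fun (acc : Int × Option Int) k =>
      let total := (pvAltPass window_payloads (k_max + 1).toNat).1.getD k 0
        + (pvAltPass window_payloads (k_max + 1).toNat).2 * (1 + (k : Int))
      match acc.2 with
      | none => ((k : Int), some total)
      | some b => if total < b then ((k : Int), some total) else acc)
    (0, none)).1

-- ===== PRECONDITION & SPEC =====
def Spec_estimate_k_window_optimal (window_payloads : List (List Int)) (k_max : Int) (out : Int) : Prop := out = estimate_k_window_optimal_alt window_payloads k_max
instance (window_payloads : List (List Int)) (k_max : Int) (out : Int) : Decidable (Spec_estimate_k_window_optimal window_payloads k_max out) := by unfold Spec_estimate_k_window_optimal; infer_instance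

-- ===== CLAIM (what is proved, stated in full; the proofs are below) =====
def Claim_equal_estimate_k_window_optimal : Prop := ∀ (window_payloads : List (List Int)) (k_max : Int), Dom_estimate_k_window_optimal window_payloads k_max → Spec_estimate_k_window_optimal window_payloads k_max (estimate_k_window_optimal window_payloads k_max)

-- ===== LEMMAS AND PROOFS =====

-- sum-out of an additive fold
theorem pv_foldl_add_sum (l : List Int) (g : Int → Int) (init : Int) :
    l.foldl (fun c s => c + g s) init = init + (l.map g).sum := by
  induction l generalizing init with
  | nil => simp
  | cons x xs ih => simp [List.foldl_cons, ih, add_assoc]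

-- A's nested cost loop equals a sum over the flattened symbols
theorem pv_costA (wp : List (List Int)) (k : Int) :
    wp.foldl (fun cost payload =>
        payload.foldl (fun cost (s : Int) => cost + ((s >>> k.toNat) + 1 + k)) cost) 0
      = (wp.flatten.map (fun (s : Int) => s >>> k.toNat)).sum + (wp.flatten.length : Int) * (1 + k) := by
  rw [← List.foldl_flatten]
  rw [pv_foldl_add_sum]
  induction wp.flatten with
  | nil => simp
  | cons x xs ih =>
    simp only [List.map_cons, List.sum_cons, List.length_cons] at *
    push_cast
    linarith

-- B's data pass: the counter counts the symbols
theorem pv_passB_cnt (xs : List Int) (cs : List Int) (n : Int) :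
    (xs.foldl (fun (st : List Int × Int) (s : Int) =>
        (st.1.mapIdx (fun k (c : Int) => c + (s >>> k)), st.2 + 1)) (cs, n)).2 = n + xs.length := by
  induction xs generalizing cs n with
  | nil => simp
  | cons x xs ih =>
    simp only [List.foldl_cons, List.length_cons]
    rw [ih]
    push_cast
    ring

-- B's data pass: pointwise value of the cost table
theorem pv_passB_get (xs : List Int) (cs : List Int) (n : Int) (k : Nat) (hk : k < cs.length) :
    (xs.foldl (fun (st : List Int × Int) (s : Int) =>
        (st.1.mapIdx (fun kk (c : Int) => c + (s >>> kk)), st.2 + 1)) (cs, n)).1.getD k 0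
      = cs.getD k 0 + (xs.map (fun (s : Int) => s >>> k)).sum := by
  induction xs generalizing cs n with
  | nil => simp
  | cons x xs ih =>
    simp only [List.foldl_cons]
    rw [ih _ _ (by simpa using hk)]
    have h1 : (cs.mapIdx (fun kk (c : Int) => c + (x >>> kk))).getD k 0 = cs.getD k 0 + (x >>> k) := by
      rw [List.getD_eq_getElem _ _ (by simpa using hk), List.getD_eq_getElem _ _ hk]
      simp
    rw [h1]
    simp [add_assoc]

-- the nested fold over payloads equals the fold over the flattened symbols
theorem pv_passB_flatten (wp : List (List Int)) (st : List Int × Int) :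
    wp.foldl (fun st payload =>
        payload.foldl (fun (st : List Int × Int) (s : Int) =>
          (st.1.mapIdx (fun k (c : Int) => c + (s >>> k)), st.2 + 1)) st) st
      = wp.flatten.foldl (fun (st : List Int × Int) (s : Int) =>
          (st.1.mapIdx (fun k (c : Int) => c + (s >>> k)), st.2 + 1)) st := by
  rw [List.foldl_flatten]

-- ===== VERDICT (by name: the statement is the Claim_ definition above) =====
theorem estimate_k_window_optimal_spec : Claim_equal_estimate_k_window_optimal := by
  intro wp k_max _
  unfold Spec_estimate_k_window_optimal estimate_k_window_optimal estimate_k_window_optimal_alt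
  have hrange : PySem.List.pyRange 0 (k_max + 1) 1
      = (List.range (k_max + 1).toNat).map (fun k : Nat => (0 : Int) + (k : Int)) := by
    rw [PySem.List.pyRange_one, show (k_max + 1 - 0).toNat = (k_max + 1).toNat from by omega]
  rw [hrange, List.foldl_map]
  refine congrArg Prod.fst ?_
  apply PySem.List.foldl_congr_mem
  intro acc k hk
  have hk' : k < (k_max + 1).toNat := List.mem_range.mp hk
  have hcost : wp.foldl
      (fun cost payload =>
        payload.foldl (fun cost (s : Int) => cost + ((s >>> ((0 : Int) + (k : Int)).toNat) + 1 + ((0 : Int) + (k : Int)))) cost) 0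
      = (wp.flatten.map (fun (s : Int) => s >>> k)).sum + (wp.flatten.length : Int) * (1 + (k : Int)) := by
    rw [show ((0 : Int) + (k : Int)) = (k : Int) from by omega]
    rw [pv_costA]
    norm_num
  have hget : (pvAltPass wp (k_max + 1).toNat).1.getD k 0
      = (wp.flatten.map (fun (s : Int) => s >>> k)).sum := by
    unfold pvAltPass
    rw [pv_passB_flatten,
        pv_passB_get wp.flatten (List.replicate (k_max + 1).toNat (0 : Int)) 0 k (by simpa using hk')]
    simp
  have hcnt : (pvAltPass wp (k_max + 1).toNat).2 = (wp.flatten.length : Int) := by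
    unfold pvAltPass
    rw [pv_passB_flatten, pv_passB_cnt]
    omega
  simp only [hcost, hget, hcnt]
  norm_num
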